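-- pv_equiv track=rewrite | github.com/greeny34/alfred-fantasy-football | scripts/run_draft_assistant_fixed.py | get_positions_needed
-- ===== SOURCE A (Python) =====
-- def get_positions_needed(roster):
--     position_counts = {}
--     for player in roster:
--         pos = player['position']
--         position_counts[pos] = position_counts.get(pos, 0) + 1
--
--     needs = []
--     if position_counts.get('QB', 0) < 2: needs.append('QB')
--     if position_counts.get('RB', 0) < 4: needs.append('RB')
--     if position_counts.get('WR', 0) < 5: needs.append('WR')
--     if position_counts.get('TE', 0) < 2: needs.append('TE')
--
--     return needs if needs else ['RB', 'WR', 'QB', 'TE']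
-- ===== SOURCE B (Python) =====
-- def get_positions_needed(roster):
--     # Slot-consumption: lay out one token per required roster slot, let each
--     # player consume a matching token, and the distinct leftover tokens (in
--     # layout order) are the positions still needed.
--     slots = ['QB', 'QB', 'RB', 'RB', 'RB', 'RB',
--              'WR', 'WR', 'WR', 'WR', 'WR', 'TE', 'TE']
--     for player in roster:
--         pos = player['position']
--         if pos in slots:
--             slots.remove(pos)
--     needs = list(dict.fromkeys(slots))
--     return needs if needs else ['RB', 'WR', 'QB', 'TE']
-- ===== Notes on version B (the rewrite author's own statement) =====
-- stated objective: alternative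
-- what changed: Replaces A's count-dict-then-threshold-probe pass with a slot-consumption algorithm: a list with one token per required roster slot is laid out, each player removes one matching token, and the ordered-distinct leftover tokens are the positions still needed.
import Mathlib
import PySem

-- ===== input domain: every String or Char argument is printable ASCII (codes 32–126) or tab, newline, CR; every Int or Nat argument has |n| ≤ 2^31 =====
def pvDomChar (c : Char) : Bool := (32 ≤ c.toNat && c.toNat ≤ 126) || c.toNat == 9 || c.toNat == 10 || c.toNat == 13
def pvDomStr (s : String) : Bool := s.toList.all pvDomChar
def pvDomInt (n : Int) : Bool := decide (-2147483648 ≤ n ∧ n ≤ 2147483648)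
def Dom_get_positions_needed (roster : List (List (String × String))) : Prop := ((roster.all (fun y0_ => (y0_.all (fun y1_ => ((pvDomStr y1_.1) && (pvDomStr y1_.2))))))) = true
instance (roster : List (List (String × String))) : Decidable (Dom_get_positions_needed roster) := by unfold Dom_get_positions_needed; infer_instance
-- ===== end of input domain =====

-- B replaces A's count-dict-then-threshold-probe pass with a slot-consumption
-- algorithm: one token per required roster slot, each player consumes a matching
-- token, the ordered-distinct leftovers are the needed positions (objective: alternative).

-- ===== PORT A =====
def get_positions_needed (roster : List (List (String × String))) : List String :=
  let position_counts : PySem.Dict String Int :=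
    roster.foldl (fun d player =>
      let pos := (List.lookup "position" player).getD ""
      d.modify pos 0 (· + 1)) PySem.Dict.empty
  let needs : List String := []
  let needs := if position_counts.getD "QB" 0 < 2 then needs ++ ["QB"] else needs
  let needs := if position_counts.getD "RB" 0 < 4 then needs ++ ["RB"] else needs
  let needs := if position_counts.getD "WR" 0 < 5 then needs ++ ["WR"] else needs
  let needs := if position_counts.getD "TE" 0 < 2 then needs ++ ["TE"] else needs
  if needs ≠ [] then needs else ["RB", "WR", "QB", "TE"]

-- ===== PORT B =====
def get_positions_needed_alt (roster : List (List (String × String))) : List String :=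
  let slots0 : List String := ["QB", "QB", "RB", "RB", "RB", "RB",
                               "WR", "WR", "WR", "WR", "WR", "TE", "TE"]
  let slots := roster.foldl (fun slots player =>
    let pos := (List.lookup "position" player).getD ""
    if slots.contains pos then (PySem.List.remove? slots pos).getD slots else slots) slots0
  let needs := PySem.List.dedup slots
  if needs ≠ [] then needs else ["RB", "WR", "QB", "TE"]

-- ===== PRECONDITION & SPEC =====
-- A (and B) raise KeyError when some player dict lacks the 'position' key; Pre_ excludes exactly those.
def Pre_get_positions_needed (roster : List (List (String × String))) : Prop :=
  ∀ p ∈ roster, (List.lookup "position" p).isSome = true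
instance (roster : List (List (String × String))) : Decidable (Pre_get_positions_needed roster) := by
  unfold Pre_get_positions_needed; infer_instance

def pvWitness_get_positions_needed : (List (List (String × String))) :=
  [[("position", "QB"), ("name", "Josh")], [("position", "RB")]]

def Spec_get_positions_needed (roster : List (List (String × String))) (out : List String) : Prop := out = get_positions_needed_alt roster
instance (roster : List (List (String × String))) (out : List String) : Decidable (Spec_get_positions_needed roster out) := by unfold Spec_get_positions_needed; infer_instance

-- ===== CLAIM (what is proved, stated in full; the proofs are below) =====
def Claim_equal_get_positions_needed : Prop := ∀ (roster : List (List (String × String))), Dom_get_positions_needed roster → Pre_get_positions_needed roster → Spec_get_positions_needed roster (get_positions_needed roster)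

-- ===== LEMMAS AND PROOFS =====

-- the canonical slot list for remaining budgets (q, r, w, t)
def pvCanon (q r w t : Nat) : List String :=
  List.replicate q "QB" ++ List.replicate r "RB" ++ List.replicate w "WR" ++ List.replicate t "TE"

theorem mem_canon (q r w t : Nat) (pos : String) :
    pos ∈ pvCanon q r w t ↔ (pos = "QB" ∧ 0 < q) ∨ (pos = "RB" ∧ 0 < r) ∨ (pos = "WR" ∧ 0 < w) ∨ (pos = "TE" ∧ 0 < t) := by
  simp [pvCanon, List.mem_replicate, and_comm, Nat.pos_iff_ne_zero]

-- one consumption step of B on a canonical slot list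
theorem consume_canon (q r w t : Nat) (pos : String) :
    (if (pvCanon q r w t).contains pos
     then (PySem.List.remove? (pvCanon q r w t) pos).getD (pvCanon q r w t)
     else pvCanon q r w t)
    = pvCanon (q - (if pos = "QB" then 1 else 0)) (r - (if pos = "RB" then 1 else 0))
              (w - (if pos = "WR" then 1 else 0)) (t - (if pos = "TE" then 1 else 0)) := by
  by_cases hq : pos = "QB"
  · subst hq
    cases q with
    | zero => simp [pvCanon, List.mem_replicate]
    | succ q =>
      have h1 : pvCanon (q+1) r w t = "QB" :: pvCanon q r w t := by
        simp [pvCanon, List.replicate_succ]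
      rw [h1]; simp [PySem.List.remove?_cons_self]
  by_cases hr : pos = "RB"
  · subst hr
    cases r with
    | zero => simp [pvCanon, List.mem_replicate, hq]
    | succ r =>
      have hmem : "RB" ∈ pvCanon q (r+1) w t := by rw [mem_canon]; simp
      have her : (pvCanon q (r+1) w t).erase "RB" = pvCanon q r w t := by
        simp only [pvCanon, List.replicate_succ, List.append_assoc, List.cons_append]
        rw [List.erase_append_right _ (by simp [List.mem_replicate])]
        simp
      simp [hmem, PySem.List.remove?_eq_some_erase _ _ hmem, her, hq]
  by_cases hw : pos = "WR"
  · subst hw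
    cases w with
    | zero => simp [pvCanon, List.mem_replicate, hq, hr]
    | succ w =>
      have hmem : "WR" ∈ pvCanon q r (w+1) t := by rw [mem_canon]; simp
      have her : (pvCanon q r (w+1) t).erase "WR" = pvCanon q r w t := by
        simp only [pvCanon, List.replicate_succ, List.append_assoc, List.cons_append]
        rw [List.erase_append_right _ (by simp [List.mem_replicate])]
        rw [List.erase_append_right _ (by simp [List.mem_replicate])]
        simp
      simp [hmem, PySem.List.remove?_eq_some_erase _ _ hmem, her, hq, hr]
  by_cases ht : pos = "TE"
  · subst ht
    cases t with
    | zero => simp [pvCanon, List.mem_replicate, hq, hr, hw]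
    | succ t =>
      have hmem : "TE" ∈ pvCanon q r w (t+1) := by rw [mem_canon]; simp
      have her : (pvCanon q r w (t+1)).erase "TE" = pvCanon q r w t := by
        simp only [pvCanon, List.replicate_succ, List.append_assoc]
        rw [List.erase_append_right _ (by simp [List.mem_replicate])]
        rw [List.erase_append_right _ (by simp [List.mem_replicate])]
        rw [List.erase_append_right _ (by simp [List.mem_replicate])]
        simp
      simp [hmem, PySem.List.remove?_eq_some_erase _ _ hmem, her, hq, hr, hw]
  · have hnm : pos ∉ pvCanon q r w t := by
      rw [mem_canon]; simp [hq, hr, hw, ht]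
    simp [hnm, hq, hr, hw, ht]

-- B's whole consumption fold: remaining budgets are the requirements minus the counts
theorem fold_consume {α : Type} (l : List α) (f : α → String) (q r w t : Nat) :
    l.foldl (fun slots x =>
      if slots.contains (f x) then (PySem.List.remove? slots (f x)).getD slots else slots)
      (pvCanon q r w t)
    = pvCanon (q - l.countP (fun x => f x == "QB")) (r - l.countP (fun x => f x == "RB"))
              (w - l.countP (fun x => f x == "WR")) (t - l.countP (fun x => f x == "TE")) := by
  induction l generalizing q r w t with
  | nil => simp
  | cons p ps ih =>
    simp only [List.foldl_cons, consume_canon, ih, List.countP_cons]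
    congr 1 <;> (split_ifs <;> simp_all <;> omega)

-- B's dedup of a canonical slot list, for the budgets that actually occur
theorem dedup_canon (q r w t : Nat) (hq : q ≤ 2) (hr : r ≤ 4) (hw : w ≤ 5) (ht : t ≤ 2) :
    PySem.List.dedup (pvCanon q r w t)
    = ((if 0 < q then ["QB"] else []) ++ (if 0 < r then ["RB"] else []))
      ++ ((if 0 < w then ["WR"] else []) ++ (if 0 < t then ["TE"] else [])) := by
  interval_cases q <;> interval_cases r <;> interval_cases w <;> interval_cases t <;> decide

-- A's counting dict, probed at any position, is the count of matching players
theorem counts_eq (roster : List (List (String × String))) (pos : String) :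
    (roster.foldl (fun d player =>
        d.modify ((List.lookup "position" player).getD "") 0 (· + 1))
      (PySem.Dict.empty : PySem.Dict String Int)).getD pos 0
    = (roster.countP (fun p => (List.lookup "position" p).getD "" == pos) : Int) := by
  have h := (List.foldl_map
      (f := fun player : List (String × String) => (List.lookup "position" player).getD "")
      (g := fun (d : PySem.Dict String Int) x => d.modify x 0 (· + 1))
      (l := roster) (init := PySem.Dict.empty)).symm
  rw [h]
  rw [PySem.Dict.getD_foldl_modify_add_one, PySem.Dict.getD_empty]
  simp [List.count_eq_countP, List.countP_map, Function.comp_def]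

-- ===== VERDICT (by name: the statement is the Claim_ definition above) =====
theorem get_positions_needed_spec : Claim_equal_get_positions_needed := by
  intro roster _ _
  show get_positions_needed roster = get_positions_needed_alt roster
  have hcanon : (["QB", "QB", "RB", "RB", "RB", "RB", "WR", "WR", "WR", "WR", "WR", "TE", "TE"] : List String) = pvCanon 2 4 5 2 := by decide
  simp only [get_positions_needed, get_positions_needed_alt, counts_eq]
  rw [hcanon, fold_consume roster (fun player => (List.lookup "position" player).getD ""),
      dedup_canon _ _ _ _ (by omega) (by omega) (by omega) (by omega)]
  set cQ := roster.countP (fun p => (List.lookup "position" p).getD "" == "QB")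
  set cR := roster.countP (fun p => (List.lookup "position" p).getD "" == "RB")
  set cW := roster.countP (fun p => (List.lookup "position" p).getD "" == "WR")
  set cT := roster.countP (fun p => (List.lookup "position" p).getD "" == "TE")
  have eQ : ((cQ : Int) < 2) ↔ (0 < 2 - cQ) := by omega
  have eR : ((cR : Int) < 4) ↔ (0 < 4 - cR) := by omega
  have eW : ((cW : Int) < 5) ↔ (0 < 5 - cW) := by omega
  have eT : ((cT : Int) < 2) ↔ (0 < 2 - cT) := by omega
  simp only [eQ, eR, eW, eT]
  by_cases h1 : 0 < 2 - cQ <;> by_cases h2 : 0 < 4 - cR <;>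
    by_cases h3 : 0 < 5 - cW <;> by_cases h4 : 0 < 2 - cT <;>
    simp [h1, h2, h3, h4]
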